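-- pv_equiv track=rewrite | github.com/meszszi/Quine-McCluskey | quine.py | get_minterms
-- ===== SOURCE A (Python) =====
-- def evaluate(rpn_expression, values):
--
--     stack = []
--
--     for token in rpn_expression:
--
--         if token == '=':
--             stack = stack[:-2] + [ stack[-2] == stack[-1] ]
--
--         elif token == '>':
--             stack = stack[:-2] + [ (not stack[-2]) or stack[-1] ]
--
--         elif token == '&':
--             stack = stack[:-2] + [ stack[-2] and stack[-1] ]
--
--         elif token == '|':
--             stack = stack[:-2] + [ stack[-2] or stack[-1] ]
--
--         elif token == '^':
--             stack = stack[:-2] + [ stack[-2] != stack[-1] ]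
--
--         elif token == '~':
--             stack = stack[:-1] + [ not stack[-1] ]
--
--         elif token == '1':
--             stack += [True]
--
--         elif token == '0':
--             stack += [False]
--
--         else:
--             stack += [ values[token] ]
--
--
--     return stack[0]
--
-- def get_variables(rpn_expression):
--     return sorted(set([token for token in rpn_expression if token not in '&|^>=~01']))
--
-- def get_bitmask(number, width):
--     return bin(number)[2:].rjust(width, '0')
--
-- def get_values(bitmask_number, variables):
--
--     result = {}
--     values = map(lambda x: x == '1', get_bitmask(bitmask_number, len(variables)))
--
--     for variable, value in zip(variables, values):
--         result[variable] = value
--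
--     return result
--
-- def get_minterms(rpn_expression):
--
--     variables = get_variables(rpn_expression)
--     set_size = len(variables)
--     upper_bound = 1 << set_size
--
--     minterms = set()
--
--     for bitmask_number in range(upper_bound):
--
--         values = get_values(bitmask_number, variables)
--
--         if evaluate(rpn_expression, values) == True:
--             minterm_bitmask = 1 << bitmask_number
--             minterms.add((minterm_bitmask, get_bitmask(bitmask_number, set_size)))
--
--     return minterms, variables
-- ===== SOURCE B (Python) =====
-- def get_minterms(rpn_expression):
--     # Parse the RPN once into an expression tree (single stack pass), then
--     # evaluate the tree recursively per assignment, indexing the bitmask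
--     # string through a precomputed variable->position map -- instead of
--     # re-running a slicing stack machine over the whole token stream and
--     # rebuilding a values dict for every one of the 2**n assignments.
--     stack = []
--     for token in rpn_expression:
--         if token in '=>&|^':
--             b = stack.pop()
--             a = stack.pop()
--             stack.append((token, a, b))
--         elif token == '~':
--             stack.append(('~', stack.pop()))
--         elif token == '1':
--             stack.append(True)
--         elif token == '0':
--             stack.append(False)
--         else:
--             stack.append(token)
--     root = stack[0]
--
--     variables = sorted({t for t in rpn_expression if t not in '&|^>=~01'})
--     n = len(variables)
--     pos = {v: i for i, v in enumerate(variables)}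
--
--     def ev(node, bits):
--         if node is True or node is False:
--             return node
--         if isinstance(node, str):
--             return bits[pos[node]] == '1'
--         if node[0] == '~':
--             return not ev(node[1], bits)
--         op, a, b = node
--         x = ev(a, bits)
--         y = ev(b, bits)
--         if op == '=':
--             return x == y
--         if op == '>':
--             return (not x) or y
--         if op == '&':
--             return x and y
--         if op == '|':
--             return x or y
--         return x != y
--
--     minterms = set()
--     for m in range(1 << n):
--         bits = bin(m)[2:].rjust(n, '0')
--         if ev(root, bits):
--             minterms.add((1 << m, bits))
--     return minterms, variables
-- ===== Notes on version B (the rewrite author's own statement) =====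
-- stated objective: faster
-- what changed: B parses the RPN once into an expression tree with a single stack pass and evaluates each of the 2^n assignments by structural recursion over the tree, indexing the bitmask string via a precomputed variable-to-position map, instead of A's per-assignment run of a list-slicing stack machine over the whole token stream with a freshly built values dict per assignment.
import Mathlib
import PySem

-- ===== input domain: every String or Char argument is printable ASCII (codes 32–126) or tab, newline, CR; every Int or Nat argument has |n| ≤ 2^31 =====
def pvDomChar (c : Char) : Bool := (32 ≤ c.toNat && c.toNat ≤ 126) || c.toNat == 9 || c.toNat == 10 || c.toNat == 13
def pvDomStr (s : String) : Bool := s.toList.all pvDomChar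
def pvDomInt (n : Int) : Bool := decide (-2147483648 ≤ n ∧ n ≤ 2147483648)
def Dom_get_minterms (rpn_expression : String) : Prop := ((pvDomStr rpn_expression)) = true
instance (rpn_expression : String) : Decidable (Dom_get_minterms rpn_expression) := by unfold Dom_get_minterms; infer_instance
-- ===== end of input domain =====

-- B re-implements get_minterms by parsing the RPN once into an expression tree and evaluating it
-- recursively per assignment (objective: alternative algorithm); equivalence proved on Pre_ (well-formed RPN).

-- shared helper (both Pythons compute bin(m)[2:].rjust(w,'0')): binary digits of m, MSB first
def pyBin (m : Nat) : List Char :=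
  if m < 2 then [if m = 1 then '1' else '0']
  else pyBin (m / 2) ++ [if m % 2 = 1 then '1' else '0']
decreasing_by exact Nat.div_lt_self (by omega) (by omega)

def pyBinStr (m w : Nat) : List Char := List.replicate (w - (pyBin m).length) '0' ++ pyBin m

-- ===== PORT A =====
-- one iteration of evaluate's for-loop; none = IndexError/KeyError (Python raises there)
def evalStepA (values : PySem.Dict Char Bool) (st : List Bool) (token : Char) : Option (List Bool) :=
  if token == '=' then
    match PySem.List.pyGet? st (-2), PySem.List.pyGet? st (-1) with
    | some a, some b => some (PySem.List.slice st none (some (-2)) ++ [a == b])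
    | _, _ => none
  else if token == '>' then
    match PySem.List.pyGet? st (-2), PySem.List.pyGet? st (-1) with
    | some a, some b => some (PySem.List.slice st none (some (-2)) ++ [!a || b])
    | _, _ => none
  else if token == '&' then
    match PySem.List.pyGet? st (-2), PySem.List.pyGet? st (-1) with
    | some a, some b => some (PySem.List.slice st none (some (-2)) ++ [a && b])
    | _, _ => none
  else if token == '|' then
    match PySem.List.pyGet? st (-2), PySem.List.pyGet? st (-1) with
    | some a, some b => some (PySem.List.slice st none (some (-2)) ++ [a || b])
    | _, _ => none
  else if token == '^' then
    match PySem.List.pyGet? st (-2), PySem.List.pyGet? st (-1) with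
    | some a, some b => some (PySem.List.slice st none (some (-2)) ++ [a != b])
    | _, _ => none
  else if token == '~' then
    match PySem.List.pyGet? st (-1) with
    | some a => some (PySem.List.slice st none (some (-1)) ++ [!a])
    | none => none
  else if token == '1' then some (st ++ [true])
  else if token == '0' then some (st ++ [false])
  else
    match values.get? token with
    | some v => some (st ++ [v])
    | none => none

def evaluateA (rpn : List Char) (values : PySem.Dict Char Bool) : Option Bool :=
  match rpn.foldl (fun ost t => ost.bind (fun st => evalStepA values st t)) (some []) with
  | some st => PySem.List.pyGet? st 0      -- stack[0]
  | none => none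

def get_minterms (rpn_expression : String) : (List (Int × String)) × List String :=
  let toks := rpn_expression.toList
  let vlist : List Char :=
    PySem.List.sorted (PySem.Set.ofList (toks.filter (fun t => !("&|^>=~01".toList.contains t)))) (fun c => c) false
  let set_size := vlist.length
  let minterms : PySem.Set (Int × String) :=
    (List.range (2 ^ set_size)).foldl (fun acc m =>
      let bits := pyBinStr m set_size
      let values := (vlist.zip (bits.map (fun c => c == '1'))).foldl
        (fun d (p : Char × Bool) => d.insert p.1 p.2) PySem.Dict.empty
      match evaluateA toks values with
      | some true => PySem.Set.add acc (((1 : Int) <<< m), String.ofList (pyBinStr m set_size))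
      | _ => acc) PySem.Set.empty
  (minterms, vlist.map (fun c => String.ofList [c]))

-- ===== PORT B =====
inductive BExpr where
  | const : Bool → BExpr
  | var : Char → BExpr
  | neg : BExpr → BExpr
  | op : Char → BExpr → BExpr → BExpr
deriving Repr, DecidableEq

-- one parsing step; head of the Lean list is the TOP of Python's stack (its end);
-- the `[]` fallbacks are where Python's stack.pop() raises IndexError (outside Pre_)
def parseStep (st : List BExpr) (t : Char) : List BExpr :=
  if t == '=' || t == '>' || t == '&' || t == '|' || t == '^' then
    match st with
    | b :: a :: r => BExpr.op t a b :: r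
    | _ => []
  else if t == '~' then
    match st with
    | a :: r => BExpr.neg a :: r
    | _ => []
  else if t == '1' then BExpr.const true :: st
  else if t == '0' then BExpr.const false :: st
  else BExpr.var t :: st

-- recursive evaluator over the tree (bits[pos[v]] == '1' for vlist; the `false`
-- fallback is Python's unreachable KeyError branch, outside Pre_)
def evalB (pos : PySem.Dict Char Int) (bits : List Char) : BExpr → Bool
  | .const b => b
  | .var c =>
      match pos.get? c with
      | some i => PySem.List.pyGet? bits i == some '1'
      | none => false
  | .neg e => !(evalB pos bits e)
  | .op t a b =>
      let x := evalB pos bits a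
      let y := evalB pos bits b
      if t == '=' then x == y
      else if t == '>' then !x || y
      else if t == '&' then x && y
      else if t == '|' then x || y
      else x != y

def get_minterms_alt (rpn_expression : String) : (List (Int × String)) × List String :=
  let toks := rpn_expression.toList
  let vlist : List Char :=
    PySem.List.sorted (PySem.Set.ofList (toks.filter (fun t => !("&|^>=~01".toList.contains t)))) (fun c => c) false
  let n := vlist.length
  let pos : PySem.Dict Char Int :=
    (PySem.List.enumerate vlist 0).foldl (fun d (p : Int × Char) => d.insert p.2 p.1) PySem.Dict.empty
  match (toks.foldl parseStep []).getLast? with   -- stack[0] (root); none = IndexError, outside Pre_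
  | none => (PySem.Set.empty, vlist.map (fun c => String.ofList [c]))
  | some root =>
    let minterms : PySem.Set (Int × String) :=
      (List.range (2 ^ n)).foldl (fun acc m =>
        let bits := pyBinStr m n
        if evalB pos bits root then PySem.Set.add acc (((1 : Int) <<< m), String.ofList bits)
        else acc) PySem.Set.empty
    (minterms, vlist.map (fun c => String.ofList [c]))

-- ===== PRECONDITION & SPEC =====
-- arity count of an RPN stream starting from stack depth d: binary ops need depth ≥ 2,
-- '~' needs depth ≥ 1, and at the end the stack must be nonempty (stack[0]).
def rpnOk (d : Nat) : List Char → Bool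
  | [] => decide (1 ≤ d)
  | t :: ts =>
    if t == '=' || t == '>' || t == '&' || t == '|' || t == '^' then decide (2 ≤ d) && rpnOk (d - 1) ts
    else if t == '~' then decide (1 ≤ d) && rpnOk d ts
    else rpnOk (d + 1) ts

-- Pre_ excludes exactly the inputs on which A raises IndexError (stack underflow at an
-- operator, or an empty final stack at stack[0]); A returns on every input satisfying Pre_.
def Pre_get_minterms (rpn_expression : String) : Prop := rpnOk 0 rpn_expression.toList = true
instance (rpn_expression : String) : Decidable (Pre_get_minterms rpn_expression) := by
  unfold Pre_get_minterms; infer_instance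

def pvWitness_get_minterms : String := "ab&c|~"

def Spec_get_minterms (rpn_expression : String) (out : (List (Int × String)) × List String) : Prop :=
  out = get_minterms_alt rpn_expression
instance (rpn_expression : String) (out : (List (Int × String)) × List String) :
    Decidable (Spec_get_minterms rpn_expression out) := by unfold Spec_get_minterms; infer_instance

-- ===== CLAIM (what is proved, stated in full; the proofs are below) =====
def Claim_equal_get_minterms : Prop := ∀ (rpn_expression : String), Dom_get_minterms rpn_expression →
  Pre_get_minterms rpn_expression → Spec_get_minterms rpn_expression (get_minterms rpn_expression)

-- ===== LEMMAS AND PROOFS =====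
def isBinTok (t : Char) : Bool := t == '=' || t == '>' || t == '&' || t == '|' || t == '^'
def isVarTok (t : Char) : Bool := !("&|^>=~01".toList.contains t)
def applyOp (t : Char) (x y : Bool) : Bool :=
  if t == '=' then x == y
  else if t == '>' then !x || y
  else if t == '&' then x && y
  else if t == '|' then x || y
  else x != y

lemma evalB_op (pos : PySem.Dict Char Int) (bits : List Char) (t : Char) (a b : BExpr) :
    evalB pos bits (.op t a b) = applyOp t (evalB pos bits a) (evalB pos bits b) := rfl

lemma pyGet_last1 (l : List Bool) (x y : Bool) :
    PySem.List.pyGet? (l ++ [x, y]) (-1) = some y := by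
  rw [show l ++ [x, y] = (l ++ [x]) ++ [y] by simp]
  exact PySem.List.pyGet?_neg_one_append_singleton _ _

lemma pyGet_last2 (l : List Bool) (x y : Bool) :
    PySem.List.pyGet? (l ++ [x, y]) (-2) = some x := by
  rw [PySem.List.pyGet?_neg_ofNat _ 2 (by omega) (by simp)]
  simp

lemma slice_drop2 (l : List Bool) (x y : Bool) :
    PySem.List.slice (l ++ [x, y]) none (some (-2)) = l := by
  rw [PySem.List.slice_to_neg_ofNat _ 2 (by omega)]
  simp

lemma stepA_bin (values : PySem.Dict Char Bool) (l : List Bool) (x y : Bool) (t : Char)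
    (h : isBinTok t = true) :
    evalStepA values (l ++ [x, y]) t = some (l ++ [applyOp t x y]) := by
  simp only [isBinTok, Bool.or_eq_true, beq_iff_eq] at h
  rcases h with (((h | h) | h) | h) | h <;> subst h <;>
    simp [evalStepA, applyOp, pyGet_last1, pyGet_last2, slice_drop2]

lemma stepA_neg (values : PySem.Dict Char Bool) (l : List Bool) (x : Bool) :
    evalStepA values (l ++ [x]) '~' = some (l ++ [!x]) := by
  simp [evalStepA, PySem.List.pyGet?_neg_one_append_singleton, PySem.List.slice_to_neg_one]
lemma stepA_one (values : PySem.Dict Char Bool) (st : List Bool) :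
    evalStepA values st '1' = some (st ++ [true]) := by simp [evalStepA]

lemma stepA_zero (values : PySem.Dict Char Bool) (st : List Bool) :
    evalStepA values st '0' = some (st ++ [false]) := by simp [evalStepA]

lemma isVarTok_iff (t : Char) : isVarTok t = true ↔
    (t == '=') = false ∧ (t == '>') = false ∧ (t == '&') = false ∧ (t == '|') = false ∧
    (t == '^') = false ∧ (t == '~') = false ∧ (t == '1') = false ∧ (t == '0') = false := by
  simp [isVarTok]
  tauto

lemma stepA_var (values : PySem.Dict Char Bool) (st : List Bool) (t : Char) (v : Bool)
    (h : isVarTok t = true) (hv : values.get? t = some v) :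
    evalStepA values st t = some (st ++ [v]) := by
  obtain ⟨h1,h2,h3,h4,h5,h6,h7,h8⟩ := (isVarTok_iff t).1 h
  simp [evalStepA, h1,h2,h3,h4,h5,h6,h7,h8, hv]

lemma parse_bin (a b : BExpr) (r : List BExpr) (t : Char)
    (h : isBinTok t = true) : parseStep (b :: a :: r) t = BExpr.op t a b :: r := by
  simp only [parseStep, isBinTok] at *
  rw [if_pos h]

lemma parse_neg (a : BExpr) (r : List BExpr) :
    parseStep (a :: r) '~' = BExpr.neg a :: r := by simp [parseStep]

lemma parse_var (st : List BExpr) (t : Char) (h : isVarTok t = true) :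
    parseStep st t = BExpr.var t :: st := by
  obtain ⟨h1,h2,h3,h4,h5,h6,h7,h8⟩ := (isVarTok_iff t).1 h
  simp [parseStep, h1,h2,h3,h4,h5,h6,h7,h8]

lemma isVarTok_of (t : Char) (h : isBinTok t = false) (h6 : (t == '~') = false)
    (h7 : (t == '1') = false) (h8 : (t == '0') = false) : isVarTok t = true := by
  simp only [isBinTok, Bool.or_eq_false_iff] at h
  rw [isVarTok_iff]
  exact ⟨h.1.1.1.1, h.1.1.1.2, h.1.1.2, h.1.2, h.2, h6, h7, h8⟩
lemma rpnOk_cons (d : Nat) (t : Char) (ts : List Char) :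
    rpnOk d (t :: ts) =
      (if isBinTok t = true then decide (2 ≤ d) && rpnOk (d - 1) ts
       else if t == '~' then decide (1 ≤ d) && rpnOk d ts
       else rpnOk (d + 1) ts) := by
  simp only [rpnOk, isBinTok]
  rfl

lemma parse_len : ∀ (toks : List Char) (ts : List BExpr),
    rpnOk ts.length toks = true → 1 ≤ (toks.foldl parseStep ts).length := by
  intro toks
  induction toks with
  | nil => intro ts h; simpa [rpnOk] using h
  | cons t toks ih =>
    intro ts h
    rw [rpnOk_cons] at h
    by_cases hb : isBinTok t = true
    · rw [if_pos hb, Bool.and_eq_true, decide_eq_true_iff] at h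
      obtain ⟨hd, h⟩ := h
      match ts, hd with
      | b :: a :: r, _ =>
        rw [List.foldl_cons, parse_bin a b r t hb]
        exact ih _ (by simpa using h)
    · rw [if_neg hb] at h
      by_cases h6 : (t == '~') = true
      · rw [if_pos h6, Bool.and_eq_true, decide_eq_true_iff] at h
        obtain ⟨hd, h⟩ := h
        match ts, hd with
        | a :: r, _ =>
          rw [List.foldl_cons, beq_iff_eq.1 h6, parse_neg a r]
          exact ih _ (by simpa using h)
      · rw [if_neg h6] at h
        -- push case: t is '1', '0' or a variable; parseStep conses one node
        have hlen : (parseStep ts t).length = ts.length + 1 := by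
          by_cases h7 : (t == '1') = true
          · simp [parseStep, beq_iff_eq.1 h7]
          · by_cases h8 : (t == '0') = true
            · simp [parseStep, beq_iff_eq.1 h8]
            · rw [parse_var ts t (isVarTok_of t (by simpa using hb) (by simpa using h6)
                (by simpa using h7) (by simpa using h8))]
              simp
        rw [List.foldl_cons]
        exact ih _ (by rw [hlen]; exact h)
lemma fold_inv (values : PySem.Dict Char Bool) (pos : PySem.Dict Char Int) (bits : List Char) :
    ∀ (toks : List Char) (ts : List BExpr),
    (∀ c ∈ toks, isVarTok c = true → values.get? c = some (evalB pos bits (.var c))) →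
    rpnOk ts.length toks = true →
    toks.foldl (fun ost t => ost.bind (fun st => evalStepA values st t))
        (some ((ts.map (evalB pos bits)).reverse))
      = some (((toks.foldl parseStep ts).map (evalB pos bits)).reverse) := by
  intro toks
  induction toks with
  | nil => intro ts _ _; rfl
  | cons t toks ih =>
    intro ts hv h
    rw [rpnOk_cons] at h
    have hv' : ∀ c ∈ toks, isVarTok c = true → values.get? c = some (evalB pos bits (.var c)) :=
      fun c hc => hv c (List.mem_cons_of_mem _ hc)
    rw [List.foldl_cons, List.foldl_cons]
    by_cases hb : isBinTok t = true
    · rw [if_pos hb, Bool.and_eq_true, decide_eq_true_iff] at h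
      obtain ⟨hd, h⟩ := h
      match ts, hd with
      | b :: a :: r, _ =>
        rw [parse_bin a b r t hb]
        have e1 : ((b :: a :: r).map (evalB pos bits)).reverse
            = ((r.map (evalB pos bits)).reverse ++ [evalB pos bits a, evalB pos bits b]) := by
          simp
        have e2 : (((BExpr.op t a b :: r)).map (evalB pos bits)).reverse
            = ((r.map (evalB pos bits)).reverse ++ [applyOp t (evalB pos bits a) (evalB pos bits b)]) := by
          simp [evalB_op]
        rw [e1, Option.bind_some, stepA_bin values _ _ _ t hb, ← e2]
        exact ih _ hv' (by simpa using h)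
    · rw [if_neg hb] at h
      by_cases h6 : (t == '~') = true
      · rw [if_pos h6, Bool.and_eq_true, decide_eq_true_iff] at h
        obtain ⟨hd, h⟩ := h
        match ts, hd with
        | a :: r, _ =>
          rw [beq_iff_eq.1 h6, parse_neg a r]
          have e1 : ((a :: r).map (evalB pos bits)).reverse
              = ((r.map (evalB pos bits)).reverse ++ [evalB pos bits a]) := by simp
          have e2 : ((BExpr.neg a :: r).map (evalB pos bits)).reverse
              = ((r.map (evalB pos bits)).reverse ++ [!(evalB pos bits a)]) := by simp [evalB]
          rw [e1, Option.bind_some, stepA_neg, ← e2]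
          exact ih _ hv' (by simpa using h)
      · rw [if_neg h6] at h
        by_cases h7 : (t == '1') = true
        · rw [beq_iff_eq.1 h7] at *
          rw [Option.bind_some, stepA_one]
          have e2 : ((BExpr.const true :: ts).map (evalB pos bits)).reverse
              = ((ts.map (evalB pos bits)).reverse ++ [true]) := by simp [evalB]
          rw [show parseStep ts '1' = BExpr.const true :: ts by simp [parseStep], ← e2]
          exact ih _ hv' (by simpa using h)
        · by_cases h8 : (t == '0') = true
          · rw [beq_iff_eq.1 h8] at *
            rw [Option.bind_some, stepA_zero]
            have e2 : ((BExpr.const false :: ts).map (evalB pos bits)).reverse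
                = ((ts.map (evalB pos bits)).reverse ++ [false]) := by simp [evalB]
            rw [show parseStep ts '0' = BExpr.const false :: ts by simp [parseStep], ← e2]
            exact ih _ hv' (by simpa using h)
          · have hvar : isVarTok t = true := isVarTok_of t (by simpa using hb)
              (by simpa using h6) (by simpa using h7) (by simpa using h8)
            have hg := hv t (List.mem_cons_self) hvar
            rw [Option.bind_some, stepA_var values _ t _ hvar hg, parse_var ts t hvar]
            have e2 : ((BExpr.var t :: ts).map (evalB pos bits)).reverse
                = ((ts.map (evalB pos bits)).reverse ++ [evalB pos bits (.var t)]) := by simp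
            rw [← e2]
            exact ih _ hv' (by simpa using h)
lemma evaluateA_eq (values : PySem.Dict Char Bool) (pos : PySem.Dict Char Int) (bits : List Char)
    (toks : List Char) (root : BExpr)
    (hv : ∀ c ∈ toks, isVarTok c = true → values.get? c = some (evalB pos bits (.var c)))
    (hok : rpnOk 0 toks = true)
    (hroot : (toks.foldl parseStep []).getLast? = some root) :
    evaluateA toks values = some (evalB pos bits root) := by
  have h0 := fold_inv values pos bits toks [] hv (by simpa using hok)
  unfold evaluateA
  simp only [List.map_nil, List.reverse_nil] at h0
  rw [h0]
  show PySem.List.pyGet? _ 0 = _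
  rw [PySem.List.pyGet?_zero]
  rw [← List.head?_eq_getElem?, List.head?_reverse, List.getLast?_map, hroot]
  rfl
lemma get?_foldl_insert_zip_not_mem (vs : List Char) (ws : List Bool) (d : PySem.Dict Char Bool)
    (c : Char) (hc : c ∉ vs) :
    ((vs.zip ws).foldl (fun d (p : Char × Bool) => d.insert p.1 p.2) d).get? c = d.get? c := by
  induction vs generalizing ws d with
  | nil => rfl
  | cons v vs ih =>
    cases ws with
    | nil => rfl
    | cons w ws =>
      rw [List.zip_cons_cons, List.foldl_cons, ih _ _ (fun h => hc (List.mem_cons_of_mem _ h))]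
      exact PySem.Dict.get?_insert_of_ne _ _ (fun h => hc (h ▸ List.mem_cons_self))

lemma zip_dict_get (vs : List Char) : ∀ (ws : List Bool) (k : Nat) (hk : k < vs.length)
    (hw : k < ws.length) (hnd : vs.Nodup) (d : PySem.Dict Char Bool),
    ((vs.zip ws).foldl (fun d (p : Char × Bool) => d.insert p.1 p.2) d).get? vs[k] = some ws[k] := by
  induction vs with
  | nil => intro ws k hk; simp at hk
  | cons v vs ih =>
    intro ws k hk hw hnd d
    cases ws with
    | nil => simp at hw
    | cons w ws =>
      rw [List.zip_cons_cons, List.foldl_cons]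
      cases k with
      | zero =>
        simp only [List.getElem_cons_zero]
        rw [get?_foldl_insert_zip_not_mem vs ws _ v (List.nodup_cons.1 hnd).1]
        exact PySem.Dict.get?_insert_self _ _ _
      | succ k =>
        simp only [List.getElem_cons_succ]
        exact ih ws k (by simpa using hk) (by simpa using hw) (List.nodup_cons.1 hnd).2 _

lemma get?_foldl_insert_enum_not_mem (vs : List Char) (s : Int) (d : PySem.Dict Char Int)
    (c : Char) (hc : c ∉ vs) :
    ((PySem.List.enumerate vs s).foldl (fun d (p : Int × Char) => d.insert p.2 p.1) d).get? c
      = d.get? c := by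
  induction vs generalizing s d with
  | nil => rfl
  | cons v vs ih =>
    rw [PySem.List.enumerate_cons, List.foldl_cons, ih _ _ (fun h => hc (List.mem_cons_of_mem _ h))]
    exact PySem.Dict.get?_insert_of_ne _ _ (fun h => hc (h ▸ List.mem_cons_self))

lemma enum_pos_get (vs : List Char) : ∀ (s : Int) (d : PySem.Dict Char Int) (k : Nat)
    (hk : k < vs.length) (hnd : vs.Nodup),
    ((PySem.List.enumerate vs s).foldl (fun d (p : Int × Char) => d.insert p.2 p.1) d).get? vs[k]
      = some (s + k) := by
  induction vs with
  | nil => intro s d k hk; simp at hk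
  | cons v vs ih =>
    intro s d k hk hnd
    rw [PySem.List.enumerate_cons, List.foldl_cons]
    cases k with
    | zero =>
      simp only [List.getElem_cons_zero]
      rw [get?_foldl_insert_enum_not_mem vs _ _ v (List.nodup_cons.1 hnd).1]
      rw [PySem.Dict.get?_insert_self]
      simp
    | succ k =>
      simp only [List.getElem_cons_succ]
      rw [ih (s+1) _ k (by simpa using hk) (List.nodup_cons.1 hnd).2]
      congr 1
      push_cast
      ring

lemma pyBin_len : ∀ (m n : Nat), m < 2 ^ n → (pyBin m).length ≤ max 1 n := by
  intro m
  induction m using Nat.strong_induction_on with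
  | _ m ih =>
    intro n hm
    unfold pyBin
    by_cases h2 : m < 2
    · simp [h2]
    · rw [if_neg h2]
      have hn2 : 2 ≤ n := by
        by_contra hn
        interval_cases n <;> omega
      have : m / 2 < 2 ^ (n - 1) := by
        have : 2 ^ n = 2 ^ (n - 1) * 2 := by
          rw [← pow_succ]; congr 1; omega
        omega
      have := ih (m / 2) (Nat.div_lt_self (by omega) (by omega)) (n - 1) this
      simp only [List.length_append, List.length_cons, List.length_nil]
      omega

lemma pyBinStr_len (m n : Nat) (hm : m < 2 ^ n) (hn : 1 ≤ n) : (pyBinStr m n).length = n := by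
  have := pyBin_len m n hm
  simp only [pyBinStr, List.length_append, List.length_replicate]
  omega
-- ===== VERDICT (by name: the statement is the Claim_ definition above) =====
theorem get_minterms_spec : Claim_equal_get_minterms := by
  unfold Claim_equal_get_minterms
  intro rpn _ hpre
  unfold Spec_get_minterms
  unfold Pre_get_minterms at hpre
  simp only [get_minterms, get_minterms_alt]
  set toks := rpn.toList with htoks
  set vlist : List Char :=
    PySem.List.sorted (PySem.Set.ofList (toks.filter (fun t => !("&|^>=~01".toList.contains t))))
      (fun c => c) false with hvlist
  have hperm : vlist.Perm (PySem.Set.ofList (toks.filter (fun t => !("&|^>=~01".toList.contains t)))) :=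
    PySem.List.sorted_perm _ _ _
  have hnd : vlist.Nodup := hperm.nodup_iff.2 (PySem.Set.nodup_ofList _)
  -- root of B's parse exists, since the final stack is nonempty
  have hlen : 1 ≤ (toks.foldl parseStep []).length := parse_len toks [] (by simpa using hpre)
  obtain ⟨root, hroot⟩ : ∃ r, (toks.foldl parseStep []).getLast? = some r := by
    cases h : (toks.foldl parseStep []).getLast? with
    | none => rw [List.getLast?_eq_none_iff] at h; rw [h] at hlen; simp at hlen
    | some r => exact ⟨r, rfl⟩
  rw [hroot]
  refine Prod.ext ?_ rfl
  apply PySem.List.foldl_congr_mem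
  intro acc m hm
  have hm2 : m < 2 ^ vlist.length := List.mem_range.1 hm
  have hv : ∀ c ∈ toks, isVarTok c = true →
      ((vlist.zip ((pyBinStr m vlist.length).map (fun c => c == '1'))).foldl
        (fun d (p : Char × Bool) => d.insert p.1 p.2) PySem.Dict.empty).get? c
      = some (evalB ((PySem.List.enumerate vlist 0).foldl
          (fun d (p : Int × Char) => d.insert p.2 p.1) PySem.Dict.empty)
          (pyBinStr m vlist.length) (.var c)) := by
    intro c hc hvarc
    have hcv : c ∈ vlist := by
      rw [hperm.mem_iff, PySem.Set.mem_ofList]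
      exact List.mem_filter.2 ⟨hc, by simpa [isVarTok] using hvarc⟩
    obtain ⟨k, hk, hck⟩ := List.mem_iff_getElem.1 hcv
    have hn1 : 1 ≤ vlist.length := by omega
    have hbl : (pyBinStr m vlist.length).length = vlist.length := pyBinStr_len _ _ hm2 hn1
    subst hck
    rw [zip_dict_get vlist _ k hk (by rw [List.length_map, hbl]; exact hk) hnd _]
    rw [List.getElem_map]
    have hpos := enum_pos_get vlist 0 PySem.Dict.empty k hk hnd
    simp only [evalB, hpos, zero_add]
    rw [PySem.List.pyGet?_natCast]
    rw [List.getElem?_eq_getElem (by omega)]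
    simp
  have heval := evaluateA_eq _ _ _ toks root hv hpre hroot
  rw [heval]
  cases hb : evalB ((PySem.List.enumerate vlist 0).foldl
      (fun d (p : Int × Char) => d.insert p.2 p.1) PySem.Dict.empty)
      (pyBinStr m vlist.length) root <;> simp
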